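-- pv_equiv track=rewrite | github.com/atulsinha007/Tweet-summarization | helper.py | segregation
-- ===== SOURCE A (Python) =====
-- n_content_words = 1
--
-- content_words = ['kerala', 'flood', 'injured', 'dead',
-- 				'missing', 'live', 'infrastructure',
-- 				'collapse', 'livestock', 'building',
-- 				'casuality', 'food', 'keralaflood', 'died',
-- 				'destroyed', 'death', 'deaths', 'damaged', 'hundreds',
-- 				'thousands', 'bridges', 'keralaflood']
--
-- def segregation(tweets):
-- 	dic = {}
-- 	counter = 0
--
-- 	for tweet in tweets:
-- 		dic[tuple(tweet)] = 0
-- 		for token in tweet: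
-- 			if token.lower() in set(content_words):
-- 				dic[tuple(tweet)] += 1
-- 		counter += 1
-- 	finalized_tweets = []
-- 	for x in tweets:
-- 		if dic[tuple(x)] > n_content_words:
-- 			finalized_tweets.append(x)
-- 	return finalized_tweets
-- ===== SOURCE B (Python) =====
-- n_content_words = 1
--
-- content_words = ['kerala', 'flood', 'injured', 'dead',
--                  'missing', 'live', 'infrastructure',
--                  'collapse', 'livestock', 'building',
--                  'casuality', 'food', 'keralaflood', 'died',
--                  'destroyed', 'death', 'deaths', 'damaged', 'hundreds',
--                  'thousands', 'bridges', 'keralaflood']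
--
-- _CONTENT_SET = frozenset(content_words)
--
--
-- def _has_second_content(tokens):
--     # state machine: look for a FIRST content token, then for a SECOND one;
--     # stops as soon as the second is found (no count is ever maintained)
--     seen_one = False
--     for tok in tokens:
--         if tok.lower() in _CONTENT_SET:
--             if seen_one:
--                 return True
--             seen_one = True
--     return False
--
--
-- def segregation(tweets):
--     out = []
--     for tweet in tweets:
--         if _has_second_content(tweet):
--             out.append(tweet)
--     return out
-- ===== Notes on version B (the rewrite author's own statement) =====
-- stated objective: faster
-- what changed: Replaces the two-pass dict index (count per tuple(tweet), then a lookup-filter pass) with a single in-order pass using an early-exit two-state search: per tweet it looks for a first and then a second content token and stops immediately, never maintaining a count or a dict; the content-word set is built once instead of per token.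
import Mathlib
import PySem

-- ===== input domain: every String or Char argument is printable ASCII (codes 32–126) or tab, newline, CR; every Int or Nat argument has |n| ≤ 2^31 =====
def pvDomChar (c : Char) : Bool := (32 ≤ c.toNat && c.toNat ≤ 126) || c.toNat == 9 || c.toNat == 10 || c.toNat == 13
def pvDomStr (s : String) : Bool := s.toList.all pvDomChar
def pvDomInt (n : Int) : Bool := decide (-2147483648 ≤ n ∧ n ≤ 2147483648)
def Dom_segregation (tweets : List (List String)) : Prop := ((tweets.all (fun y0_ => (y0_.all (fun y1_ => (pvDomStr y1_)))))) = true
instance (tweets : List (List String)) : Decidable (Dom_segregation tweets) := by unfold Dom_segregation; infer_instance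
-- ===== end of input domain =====

-- ===== PORT A =====
-- B replaces A's two passes (a dict of counts keyed by the tweet, then a lookup-filter pass)
-- with one in-order pass using an early-exit two-state search for a second content token.
def contentWords : List String :=
  ["kerala", "flood", "injured", "dead",
   "missing", "live", "infrastructure",
   "collapse", "livestock", "building",
   "casuality", "food", "keralaflood", "died",
   "destroyed", "death", "deaths", "damaged", "hundreds",
   "thousands", "bridges", "keralaflood"]

-- token.lower() in set(content_words)
def isContent (token : String) : Bool :=
  PySem.Set.contains (PySem.Set.ofList contentWords) (PySem.Str.lower token)

-- one outer-loop body of A: dic[tuple(tweet)] = 0; for token in tweet: if …: dic[tuple(tweet)] += 1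
def segStep (d : PySem.Dict (List String) Int) (tweet : List String) : PySem.Dict (List String) Int :=
  tweet.foldl (fun d' token => if isContent token then d'.modify tweet 0 (· + 1) else d')
    (d.insert tweet 0)

def segregation (tweets : List (List String)) : List (List String) :=
  -- counter is incremented but never used, kept as in A
  let st := tweets.foldl (fun (p : PySem.Dict (List String) Int × Int) tweet =>
    (segStep p.1 tweet, p.2 + 1)) (PySem.Dict.empty, 0)
  let dic := st.1
  -- dic[tuple(x)]: the key is always present (set in the first loop), so getD is exact
  tweets.foldl (fun acc x => if dic.getD x 0 > (1 : Int) then acc ++ [x] else acc) []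

-- ===== PORT B =====
-- _has_second_content: state machine over the tokens, the Bool is `seen_one`
def hasSecondContent : Bool → List String → Bool
  | _, [] => false
  | seenOne, tok :: rest =>
      if isContent tok then
        (if seenOne then true else hasSecondContent true rest)
      else hasSecondContent seenOne rest

def segregation_alt (tweets : List (List String)) : List (List String) :=
  tweets.foldl (fun out tweet => if hasSecondContent false tweet then out ++ [tweet] else out) []

-- ===== PRECONDITION & SPEC =====
def Spec_segregation (tweets : List (List String)) (out : List (List String)) : Prop := out = segregation_alt tweets
instance (tweets : List (List String)) (out : List (List String)) : Decidable (Spec_segregation tweets out) := by unfold Spec_segregation; infer_instance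

-- ===== CLAIM (what is proved, stated in full; the proofs are below) =====
def Claim_equal_segregation : Prop := ∀ (tweets : List (List String)), Dom_segregation tweets → Spec_segregation tweets (segregation tweets)

-- ===== LEMMAS AND PROOFS =====

-- the state machine finds a second content token iff the count (plus the carried state) reaches 2
theorem hasSecondContent_eq_countP (l : List String) (b : Bool) :
    hasSecondContent b l
      = decide (2 ≤ l.countP isContent + (if b then 1 else 0)) := by
  induction l generalizing b with
  | nil => cases b <;> simp [hasSecondContent]
  | cons x xs ih =>
    by_cases hx : isContent x
    · cases b <;> simp [hasSecondContent, hx, ih]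
    · simp [hasSecondContent, hx, ih]

-- the inner token loop adds the content-token count to key `t` and leaves other keys alone
theorem getD_inner_loop (l : List String) (t k : List String)
    (d : PySem.Dict (List String) Int) :
    (l.foldl (fun d' token => if isContent token then d'.modify t 0 (· + 1) else d') d).getD k 0
      = d.getD k 0 + (if k = t then (l.countP isContent : Int) else 0) := by
  induction l generalizing d with
  | nil => simp
  | cons x xs ih =>
    simp only [List.foldl_cons, List.countP_cons]
    by_cases hx : isContent x
    · simp only [hx, if_true]
      rw [ih, PySem.Dict.getD_modify]
      split_ifs with h <;> simp [h] <;> ring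
    · simp only [hx]
      rw [ih]
      simp

theorem getD_segStep (d : PySem.Dict (List String) Int) (t k : List String) :
    (segStep d t).getD k 0
      = if k = t then (t.countP isContent : Int) else d.getD k 0 := by
  unfold segStep
  rw [getD_inner_loop, PySem.Dict.getD_insert]
  split_ifs <;> · simp

-- lookup of x in the dict built by the outer loop, when x is not among the tweets processed
theorem getD_outer_not_mem (ts : List (List String)) (x : List String)
    (p : PySem.Dict (List String) Int × Int) (hx : x ∉ ts) :
    (ts.foldl (fun (p : PySem.Dict (List String) Int × Int) tweet =>
      (segStep p.1 tweet, p.2 + 1)) p).1.getD x 0 = p.1.getD x 0 := by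
  induction ts generalizing p with
  | nil => rfl
  | cons t rest ih =>
    simp only [List.mem_cons, not_or] at hx
    rw [List.foldl_cons, ih _ hx.2]
    simp [getD_segStep, hx.1]

-- lookup of x in the dict built by the outer loop, when x is among the tweets processed
theorem getD_outer_mem (ts : List (List String)) (x : List String)
    (p : PySem.Dict (List String) Int × Int) (hx : x ∈ ts) :
    (ts.foldl (fun (p : PySem.Dict (List String) Int × Int) tweet =>
      (segStep p.1 tweet, p.2 + 1)) p).1.getD x 0 = (x.countP isContent : Int) := by
  induction ts generalizing p with
  | nil => cases hx
  | cons t rest ih =>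
    rw [List.foldl_cons]
    by_cases hr : x ∈ rest
    · exact ih _ hr
    · have hxt : x = t := by
        rcases List.mem_cons.mp hx with h | h
        · exact h
        · exact absurd h hr
      rw [getD_outer_not_mem _ _ _ hr]
      simp [getD_segStep, hxt]

-- both append-if loops, with pointwise equivalent tests on the elements actually traversed
theorem foldl_append_if_congr (ts : List (List String))
    (p q : List String → Prop) [DecidablePred p] [DecidablePred q] (acc : List (List String))
    (h : ∀ x ∈ ts, p x ↔ q x) :
    ts.foldl (fun acc x => if p x then acc ++ [x] else acc) acc
      = ts.foldl (fun acc x => if q x then acc ++ [x] else acc) acc := by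
  induction ts generalizing acc with
  | nil => rfl
  | cons t rest ih =>
    simp only [List.foldl_cons]
    rw [if_congr (h t (List.mem_cons_self ..)) rfl rfl]
    exact ih _ (fun x hx => h x (List.mem_cons_of_mem _ hx))

-- ===== VERDICT (by name: the statement is the Claim_ definition above) =====
theorem segregation_spec : Claim_equal_segregation := by
  intro tweets _
  show segregation tweets = segregation_alt tweets
  unfold segregation segregation_alt
  simp only []
  apply foldl_append_if_congr
  intro x hx
  rw [getD_outer_mem _ _ _ hx, hasSecondContent_eq_countP]
  simp only [Bool.false_eq_true, if_false, Nat.add_zero, decide_eq_true_eq]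
  omega
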